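-- pv_equiv track=rewrite | github.com/Wokeeeeee/nlp-beginner | words_seg.py | to_region
-- ===== SOURCE A (Python) =====
-- def to_region(segment_str):
--     # input : 就读 于 中国人民大学    # return：[(0,1),(2,2),(3,8)] 闭区间
--     region = []
--     start = 0
--     for word in segment_str.split(" "):
--         end = start + len(word)
--         region.append((start, end - 1))
--         start = end
--     return region
-- ===== SOURCE B (Python) =====
-- def to_region(segment_str):
--     # Work on character positions directly: the word boundaries are -1, every space
--     # index, and len(s); word k lies between consecutive boundaries, shifted left by
--     # the k separator characters that precede it.
--     seps = [i for i, c in enumerate(segment_str) if c == ' ']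
--     bounds = [-1] + seps + [len(segment_str)]
--     return [(a - k + 1, b - k - 1) for k, (a, b) in enumerate(zip(bounds, bounds[1:]))]
-- ===== Notes on version B (the rewrite author's own statement) =====
-- stated objective: alternative
-- what changed: Instead of splitting the string and accumulating word lengths, B never splits: it scans the raw string for the indices of the space separators, frames them with -1 and len(s) as a boundary table, and turns each consecutive boundary pair (a,b) at word index k into the interval (a-k+1, b-k-1) by pure index arithmetic (the k preceding separators shift positions left by k).
import Mathlib
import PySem

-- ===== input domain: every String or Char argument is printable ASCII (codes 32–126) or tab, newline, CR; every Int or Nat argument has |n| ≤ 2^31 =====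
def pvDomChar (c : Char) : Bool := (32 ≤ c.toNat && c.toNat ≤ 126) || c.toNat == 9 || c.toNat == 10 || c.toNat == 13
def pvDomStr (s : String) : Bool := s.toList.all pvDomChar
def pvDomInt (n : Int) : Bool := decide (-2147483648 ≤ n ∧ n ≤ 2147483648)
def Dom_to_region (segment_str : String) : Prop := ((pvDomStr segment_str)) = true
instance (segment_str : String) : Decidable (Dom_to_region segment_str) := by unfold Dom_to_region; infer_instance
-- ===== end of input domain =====

-- B never splits the string: it finds the space positions, frames them with -1 and len(s)
-- as a boundary table, and maps each boundary pair to an interval by index arithmetic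
-- (objective: alternative; same O(n) cost).

-- ===== PORT A =====
def to_region (segment_str : String) : List (Int × Int) :=
  (((PySem.Str.split? segment_str " ").getD []).foldl
    (fun (st : List (Int × Int) × Int) w =>
      let endv := st.2 + PySem.Str.len w
      (st.1 ++ [(st.2, endv - 1)], endv))
    ([], 0)).1

-- ===== PORT B =====
def to_region_alt (segment_str : String) : List (Int × Int) :=
  let seps := (PySem.List.enumerate segment_str.toList).filterMap
    (fun p => if p.2 = ' ' then some p.1 else none)
  let bounds := [-1] ++ seps ++ [PySem.Str.len segment_str]
  (PySem.List.enumerate (bounds.zip (PySem.List.slice bounds (some 1) none))).map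
    (fun kp => (kp.2.1 - kp.1 + 1, kp.2.2 - kp.1 - 1))

-- ===== PRECONDITION & SPEC =====
def Spec_to_region (segment_str : String) (out : List (Int × Int)) : Prop := out = to_region_alt segment_str
instance (segment_str : String) (out : List (Int × Int)) : Decidable (Spec_to_region segment_str out) := by unfold Spec_to_region; infer_instance

-- ===== CLAIM (what is proved, stated in full; the proofs are below) =====
def Claim_equal_to_region : Prop := ∀ (segment_str : String), Dom_to_region segment_str → Spec_to_region segment_str (to_region segment_str)

-- ===== LEMMAS AND PROOFS =====

/-- A's loop as a pure recursion over the word lengths. -/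
def regA : List Int → Int → List (Int × Int)
  | [], _ => []
  | L :: tl, s => (s, s + L - 1) :: regA tl (s + L)

/-- Splitting on a single space, structurally. -/
def mySplit : List Char → List (List Char)
  | [] => [[]]
  | c :: t => if c = ' ' then [] :: mySplit t
              else match mySplit t with
                   | [] => [[c]]
                   | h :: tl => (c :: h) :: tl

/-- Space positions of a char list starting at global index o. -/
def sp : List Char → Int → List Int
  | [], _ => []
  | c :: t, o => if c = ' ' then o :: sp t (o + 1) else sp t (o + 1)

def mapHead (f : List Char → List Char) : List (List Char) → List (List Char)
  | [] => []
  | h :: t => f h :: t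

theorem mySplit_ne_nil (cs : List Char) : mySplit cs ≠ [] := by
  cases cs with
  | nil => simp [mySplit]
  | cons c t =>
    simp only [mySplit]
    split
    · simp
    · split <;> simp

theorem go_spec (l : List Char) : ∀ (fuel : Nat), l.length ≤ fuel → ∀ (cur : List Char) (acc : List (List Char)),
    PySem.Chars.splitOn.go [' '] fuel l cur acc
      = acc.reverse ++ mapHead (cur.reverse ++ ·) (mySplit l) := by
  induction l with
  | nil =>
    intro fuel _ cur acc
    cases fuel <;> simp [PySem.Chars.splitOn.go.eq_def, mySplit, mapHead]
  | cons c rest ih =>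
    intro fuel hf cur acc
    cases fuel with
    | zero => simp at hf
    | succ fuel =>
      have hf' : rest.length ≤ fuel := by simp only [List.length_cons] at hf; omega
      rw [PySem.Chars.splitOn.go.eq_def]
      dsimp only []
      by_cases hc : c = ' '
      · subst hc
        rw [if_pos (by simp [List.isPrefixOf])]
        have hdrop : List.drop [' '].length (' ' :: rest) = rest := by simp
        rw [hdrop, ih fuel hf' [] (cur.reverse :: acc)]
        simp only [mySplit, mapHead, List.reverse_cons, List.append_assoc,
          List.singleton_append, List.reverse_nil, List.nil_append, if_pos]
        cases mySplit rest <;> simp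
      · rw [if_neg (by simp [List.isPrefixOf]; exact fun h => absurd h.symm hc)]
        rw [ih fuel hf' (c :: cur) acc]
        have hne := mySplit_ne_nil rest
        rcases hms : mySplit rest with _ | ⟨h, tl⟩
        · exact absurd hms hne
        · simp [mySplit, hc, hms, mapHead]

theorem splitOn_eq_mySplit (cs : List Char) :
    PySem.Chars.splitOn cs [' '] = mySplit cs := by
  rw [PySem.Chars.splitOn, go_spec cs (cs.length + 1) (by omega) [] []]
  have hne := mySplit_ne_nil cs
  rcases hms : mySplit cs with _ | ⟨h, tl⟩
  · exact absurd hms hne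
  · simp [mapHead]

theorem A_fold_acc (ws : List String) (acc : List (Int × Int)) (s : Int) :
    (ws.foldl (fun (st : List (Int × Int) × Int) w =>
      let endv := st.2 + PySem.Str.len w
      (st.1 ++ [(st.2, endv - 1)], endv)) (acc, s)).1
    = acc ++ regA (ws.map PySem.Str.len) s := by
  induction ws generalizing acc s with
  | nil => simp [regA]
  | cons w tl ih =>
    simp only [List.foldl_cons, List.map_cons, regA]
    rw [ih]
    simp

theorem sp_enum (cs : List Char) : ∀ (o : Int),
    (PySem.List.enumerate cs o).filterMap
      (fun p => if p.2 = ' ' then some p.1 else none) = sp cs o := by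
  induction cs with
  | nil => intro o; simp [PySem.List.enumerate_nil, sp]
  | cons c t ih =>
    intro o
    rw [PySem.List.enumerate_cons]
    by_cases hc : c = ' ' <;> simp [sp, hc, ih]

/-- B's pairing pass on an explicit boundary list. -/
theorem zm_cons_cons (a x : Int) (r : List Int) (k : Int) :
    (PySem.List.enumerate ((a :: x :: r).zip (x :: r)) k).map
      (fun kp => (kp.2.1 - kp.1 + 1, kp.2.2 - kp.1 - 1))
    = (a - k + 1, x - k - 1) ::
      (PySem.List.enumerate ((x :: r).zip r) (k + 1)).map
        (fun kp => (kp.2.1 - kp.1 + 1, kp.2.2 - kp.1 - 1)) := by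
  simp [PySem.List.enumerate_cons]

theorem B_core (cs : List Char) : ∀ (p : Int) (k : Int),
    (PySem.List.enumerate
      ((p :: (sp cs (p + 1) ++ [p + 1 + cs.length])).zip (sp cs (p + 1) ++ [p + 1 + cs.length])) k).map
      (fun kp => (kp.2.1 - kp.1 + 1, kp.2.2 - kp.1 - 1))
    = regA ((mySplit cs).map (fun w => (w.length : Int))) (p + 1 - k) := by
  induction cs with
  | nil =>
    intro p k
    simp [sp, mySplit, regA, PySem.List.enumerate_cons, PySem.List.enumerate_nil]
    omega
  | cons c t ih =>
    intro p k
    have hend : (p : Int) + 1 + ((c :: t).length : Int) = (p + 1) + 1 + (t.length : Int) := by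
      simp only [List.length_cons]; push_cast; ring
    by_cases hc : c = ' '
    · subst hc
      have hsp : sp (' ' :: t) (p + 1) = (p + 1) :: sp t (p + 1 + 1) := by simp [sp]
      rw [hsp, hend, List.cons_append, zm_cons_cons, ih (p + 1) (k + 1)]
      have hms2 : mySplit (' ' :: t) = [] :: mySplit t := by simp [mySplit]
      rw [hms2]
      simp only [List.map_cons, regA, List.length_nil, Nat.cast_zero]
      rw [List.cons_eq_cons]
      refine ⟨by rw [Prod.mk.injEq]; omega, ?_⟩
      have : (p : Int) + 1 + 1 - (k + 1) = p + 1 - k + 0 := by ring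
      rw [this]
    · have hsp : sp (c :: t) (p + 1) = sp t (p + 1 + 1) := by simp [sp, hc]
      rw [hsp, hend]
      have hne := mySplit_ne_nil t
      rcases hms : mySplit t with _ | ⟨h, tl⟩
      · exact absurd hms hne
      rcases hr : sp t (p + 1 + 1) ++ [p + 1 + 1 + (t.length : Int)] with _ | ⟨x, r'⟩
      · cases sp t (p + 1 + 1) <;> simp at hr
      have hIH := ih (p + 1) k
      rw [hms, hr, zm_cons_cons] at hIH
      simp only [List.map_cons, regA] at hIH
      rw [List.cons_eq_cons] at hIH
      obtain ⟨h1, h2⟩ := hIH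
      have hx : x = p + 2 + (h.length : Int) := by
        have := congrArg Prod.snd h1
        simp at this
        omega
      have hms3 : mySplit (c :: t) = (c :: h) :: tl := by
        simp [mySplit, hc, hms]
      rw [zm_cons_cons, h2, hms3]
      simp only [List.map_cons, regA, List.length_cons]
      rw [List.cons_eq_cons]
      refine ⟨by rw [Prod.mk.injEq]; push_cast; omega, ?_⟩
      have : (p : Int) + 1 + 1 - k + (h.length : Int) = p + 1 - k + ((h.length : Nat) + 1 : Nat) := by push_cast; ring
      rw [← this]

-- ===== VERDICT (by name: the statement is the Claim_ definition above) =====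
theorem to_region_spec : Claim_equal_to_region := by
  intro s _
  show to_region s = to_region_alt s
  have hsplit : PySem.Str.split? s " " = some ((mySplit s.toList).map String.ofList) := by
    rw [PySem.Str.split?]
    have : " ".toList = [' '] := by decide
    rw [this]
    simp [PySem.Chars.split?, splitOn_eq_mySplit]
  rw [to_region, hsplit]
  simp only [Option.getD_some]
  rw [A_fold_acc, List.nil_append, List.map_map]
  have hlens : (mySplit s.toList).map (PySem.Str.len ∘ String.ofList)
      = (mySplit s.toList).map (fun w => (w.length : Int)) := by
    simp [Function.comp, PySem.Str.len_eq]
  rw [hlens]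
  -- B side
  rw [to_region_alt]
  simp only [sp_enum, PySem.Str.len_eq]
  rw [PySem.List.slice_from _ (by norm_num : (0:Int) ≤ 1)]
  have hb : [-1] ++ sp s.toList 0 ++ [(s.toList.length : Int)]
      = (-1 : Int) :: (sp s.toList (-1 + 1) ++ [-1 + 1 + (s.toList.length : Int)]) := by
    norm_num
  rw [hb]
  rw [show List.drop (Int.toNat 1) ((-1 : Int) :: (sp s.toList (-1 + 1) ++ [-1 + 1 + (s.toList.length : Int)]))
      = sp s.toList (-1 + 1) ++ [-1 + 1 + (s.toList.length : Int)] from rfl]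
  rw [B_core]
  norm_num
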